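-- pv_equiv track=rewrite | github.com/KingICCrab/pim_mapper | verify_k_independence.py | count_input_row_acts
-- ===== SOURCE A (Python) =====
-- def count_input_row_acts(trace):
--     """Count Row Activations for Bank 0 (Input)."""
--     row_size = 1024 # Default
--     bank_size = row_size * 1024 # Default num_rows
--
--     current_row = None
--     activations = 0
--
--     for line in trace:
--         parts = line.strip().split()
--         if len(parts) < 2: continue
--         if parts[0] != 'LD': continue
--
--         addr = int(parts[1], 16)
--         bank = addr // bank_size
--         row = (addr % bank_size) // row_size
--
--         if bank == 0: # Input
--             if current_row != row:
--                 activations += 1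
--                 current_row = row
--     return activations
-- ===== SOURCE B (Python) =====
-- def _bank0_row(line):
--     """Return the bank-0 row index of an LD line, or None if the line is not a bank-0 load."""
--     parts = line.strip().split()
--     if len(parts) < 2 or parts[0] != 'LD':
--         return None
--     addr = int(parts[1], 16)
--     if addr // (1024 * 1024) != 0:
--         return None
--     return (addr % (1024 * 1024)) // 1024
--
--
-- def count_input_row_acts(trace):
--     """Count Row Activations for Bank 0 (Input)."""
--     rows = [r for r in map(_bank0_row, trace) if r is not None]
--     return (1 if rows else 0) + sum(1 for prev, cur in zip(rows, rows[1:]) if prev != cur)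
-- ===== Notes on version B (the rewrite author's own statement) =====
-- stated objective: alternative
-- what changed: Replaces the single stateful loop carrying a mutable current_row across lines with a two-phase decomposition: first a filtered map extracting the list of bank-0 row indices, then a separate pass counting consecutive-equal groups by comparing adjacent positions.
import Mathlib
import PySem

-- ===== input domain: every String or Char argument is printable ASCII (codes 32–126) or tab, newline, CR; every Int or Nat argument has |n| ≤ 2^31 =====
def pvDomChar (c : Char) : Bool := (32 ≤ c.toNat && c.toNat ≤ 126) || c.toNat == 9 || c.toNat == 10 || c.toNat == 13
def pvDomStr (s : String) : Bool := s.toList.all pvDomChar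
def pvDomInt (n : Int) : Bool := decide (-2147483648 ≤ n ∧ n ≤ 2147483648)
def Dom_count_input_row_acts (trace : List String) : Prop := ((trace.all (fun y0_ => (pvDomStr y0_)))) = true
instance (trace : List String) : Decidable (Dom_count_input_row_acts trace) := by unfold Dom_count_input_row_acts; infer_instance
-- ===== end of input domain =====

-- B replaces A's single stateful prev-row loop by a two-phase decomposition (extract the
-- bank-0 row sequence, then count consecutive-equal groups via adjacent zip pairs); same cost.


-- ===== PORT A =====
-- A's loop; the Option result is `none` exactly when `int(parts[1], 16)` raises ValueError
-- (excluded by Pre_).  bank_size = row_size * 1024 = 1048576, row_size = 1024.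
def pvGoA : List String → Option Int → Int → Option Int
  | [], _, activations => some activations
  | line :: rest, current_row, activations =>
    match PySem.Str.split₀ (PySem.Str.strip line) with
    | p0 :: p1 :: _ =>
      if p0 ≠ "LD" then pvGoA rest current_row activations
      else
        match PySem.Int.ofStrBase? p1 16 with
        | none => none
        | some addr =>
          let bank := PySem.Int.floordiv addr 1048576
          let row := PySem.Int.floordiv (PySem.Int.mod addr 1048576) 1024
          if bank = 0 then
            if current_row ≠ some row then pvGoA rest (some row) (activations + 1)
            else pvGoA rest current_row activations
          else pvGoA rest current_row activations
    | _ => pvGoA rest current_row activations  -- len(parts) < 2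

def count_input_row_acts (trace : List String) : Int :=
  (pvGoA trace none 0).getD 0  -- getD unreachable under Pre_ (there A raises ValueError)

-- ===== PORT B =====
-- none = ValueError from int(parts[1], 16); some none = line is not a bank-0 load.
def pvBank0Row (line : String) : Option (Option Int) :=
  match PySem.Str.split₀ (PySem.Str.strip line) with
  | p0 :: p1 :: _ =>
    if p0 ≠ "LD" then some none
    else
      match PySem.Int.ofStrBase? p1 16 with
      | none => none
      | some addr =>
        if PySem.Int.floordiv addr (1024 * 1024) ≠ 0 then some none
        else some (some (PySem.Int.floordiv (PySem.Int.mod addr (1024 * 1024)) 1024))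
  | _ => some none

-- the filtered map [r for r in map(_bank0_row, trace) if r is not None]
def pvRowsB : List String → Option (List Int)
  | [] => some []
  | line :: rest =>
    match pvBank0Row line with
    | none => none
    | some none => pvRowsB rest
    | some (some r) => (pvRowsB rest).map (fun rs => r :: rs)

def count_input_row_acts_alt (trace : List String) : Int :=
  match pvRowsB trace with
  | none => 0  -- unreachable under Pre_ (there B raises ValueError, as A does)
  | some rows =>
    (if rows = [] then 0 else 1) +
      ((rows.zip (rows.drop 1)).countP (fun p => decide (p.1 ≠ p.2)) : Int)

-- ===== PRECONDITION & SPEC =====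
-- Pre_ excludes exactly the traces where int(parts[1], 16) raises ValueError (a malformed
-- hex address on an 'LD' line with at least two fields); both A and B raise there.
def pvLineOk (line : String) : Bool :=
  match PySem.Str.split₀ (PySem.Str.strip line) with
  | p0 :: p1 :: _ => p0 ≠ "LD" || (PySem.Int.ofStrBase? p1 16).isSome
  | _ => true
def Pre_count_input_row_acts (trace : List String) : Prop :=
  trace.all pvLineOk = true
instance (trace : List String) : Decidable (Pre_count_input_row_acts trace) := by
  unfold Pre_count_input_row_acts; infer_instance

def pvWitness_count_input_row_acts : List String :=
  ["LD 3ff", "ST 5", "LD 3ff", "LD 100400", "LD 0", "junk"]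

def Spec_count_input_row_acts (trace : List String) (out : Int) : Prop := out = count_input_row_acts_alt trace
instance (trace : List String) (out : Int) : Decidable (Spec_count_input_row_acts trace out) := by unfold Spec_count_input_row_acts; infer_instance

-- ===== CLAIM (what is proved, stated in full; the proofs are below) =====
def Claim_equal_count_input_row_acts : Prop := ∀ (trace : List String), Dom_count_input_row_acts trace → Pre_count_input_row_acts trace → Spec_count_input_row_acts trace (count_input_row_acts trace)

-- ===== LEMMAS AND PROOFS =====

-- number of consecutive-equal groups of `rs`, given the previously seen row `cur`
def pvCG : Option Int → List Int → Int
  | _, [] => 0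
  | cur, r :: rs => (if cur ≠ some r then 1 else 0) + pvCG (some r) rs

theorem pvGoA_eq_rowsB (trace : List String) :
    ∀ (cur : Option Int) (acts : Int),
      pvGoA trace cur acts = (pvRowsB trace).map (fun rs => acts + pvCG cur rs) := by
  induction trace with
  | nil => intro cur acts; simp [pvGoA, pvRowsB, pvCG]
  | cons line rest ih =>
    intro cur acts
    simp only [pvGoA, pvRowsB, pvBank0Row]
    cases hs : PySem.Str.split₀ (PySem.Str.strip line) with
    | nil => simpa using ih cur acts
    | cons p0 tl =>
      cases tl with
      | nil => simpa using ih cur acts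
      | cons p1 tl' =>
        by_cases hld : p0 = "LD"
        · simp only [hld, ne_eq, not_true_eq_false, if_false]
          cases hv : PySem.Int.ofStrBase? p1 16 with
          | none => simp
          | some addr =>
            have e1 : (1024 * 1024 : Int) = 1048576 := by norm_num
            rw [e1]
            simp only [ih]
            split_ifs with h1 h2
            · cases pvRowsB rest <;> simp [pvCG, h2]
            · cases pvRowsB rest
              · simp
              · simp at h2
                simp [pvCG, h2]
                ring
            · cases pvRowsB rest <;> simp
        · simp [hld, ih]

theorem pvCG_zip (rs : List Int) (r : Int) :
    pvCG (some r) rs = (((r :: rs).zip rs).countP (fun p => decide (p.1 ≠ p.2)) : Int) := by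
  induction rs generalizing r with
  | nil => simp [pvCG]
  | cons s rs ih =>
    simp only [pvCG, List.zip_cons_cons, List.countP_cons, ih s]
    by_cases h : r = s
    · simp [h]
    · simp [h]; omega

theorem pvCG_none (rows : List Int) :
    pvCG none rows =
      (if rows = [] then 0 else 1) +
        ((rows.zip (rows.drop 1)).countP (fun p => decide (p.1 ≠ p.2)) : Int) := by
  cases rows with
  | nil => simp [pvCG]
  | cons r rs => simp [pvCG, pvCG_zip rs r]

-- ===== VERDICT (by name: the statement is the Claim_ definition above) =====
theorem count_input_row_acts_spec : Claim_equal_count_input_row_acts := by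
  intro trace _ _
  unfold Spec_count_input_row_acts count_input_row_acts count_input_row_acts_alt
  rw [pvGoA_eq_rowsB trace none 0]
  cases h : pvRowsB trace with
  | none => simp
  | some rows => simp [pvCG_none rows]
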